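-- pv_equiv track=rewrite | github.com/lorenzomaranon/FP2 | ej4/src/boletin4_poo.py | _racha_consecutiva_maxima
-- ===== SOURCE A (Python) =====
-- def _racha_consecutiva_maxima(anios: list[int]) -> int:
--     if not anios:
--         return 0
--
--     mejor = 1
--     actual = 1
--     for i in range(1, len(anios)):
--         if anios[i] == anios[i - 1] + 1:
--             actual += 1
--         else:
--             actual = 1
--         if actual > mejor:
--             mejor = actual
--     return mejor
-- ===== SOURCE B (Python) =====
-- def _racha_consecutiva_maxima(anios: list[int]) -> int:
--     # Boundary decomposition: collect the start indices of maximal consecutive runs,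
--     # then the answer is the largest gap between adjacent boundaries.
--     n = len(anios)
--     bounds = [0]
--     for i in range(1, n):
--         if anios[i] != anios[i - 1] + 1:
--             bounds.append(i)
--     bounds.append(n)
--     best = 0
--     prev = bounds[0]
--     for b in bounds[1:]:
--         if b - prev > best:
--             best = b - prev
--         prev = b
--     return best
-- ===== Notes on version B (the rewrite author's own statement) =====
-- stated objective: alternative
-- what changed: Replaces the running mejor/actual streak counters with a two-phase boundary decomposition: first collect the indices where the consecutive chain breaks, then return the largest gap between adjacent boundaries.
import Mathlib
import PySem

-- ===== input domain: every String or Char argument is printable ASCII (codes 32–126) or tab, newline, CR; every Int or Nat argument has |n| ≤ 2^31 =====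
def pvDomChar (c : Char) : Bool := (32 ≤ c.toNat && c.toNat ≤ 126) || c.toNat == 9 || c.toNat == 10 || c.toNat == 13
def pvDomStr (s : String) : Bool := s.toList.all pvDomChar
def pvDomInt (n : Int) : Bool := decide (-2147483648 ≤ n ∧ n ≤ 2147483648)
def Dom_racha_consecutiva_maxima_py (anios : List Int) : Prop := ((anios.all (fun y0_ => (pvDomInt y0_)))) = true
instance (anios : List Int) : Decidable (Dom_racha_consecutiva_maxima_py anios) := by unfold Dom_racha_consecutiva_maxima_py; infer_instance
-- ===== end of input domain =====

-- B replaces A's running mejor/actual counters by a two-phase boundary decomposition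
-- (collect break indices, then take the largest gap between adjacent boundaries); objective: alternative.

-- ===== PORT A =====
def racha_consecutiva_maxima_py (anios : List Int) : Int :=
  if anios = [] then 0
  else
    ((PySem.List.pyRange 1 (anios.length : Int) 1).foldl
      (fun (p : Int × Int) i =>
        let actual := if PySem.List.pyGetD anios i 0 = PySem.List.pyGetD anios (i - 1) 0 + 1
                      then p.2 + 1 else 1
        let mejor := if actual > p.1 then actual else p.1
        (mejor, actual)) (1, 1)).1

-- ===== PORT B =====
def racha_consecutiva_maxima_py_alt (anios : List Int) : Int :=
  let n : Int := anios.length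
  let bounds : List Int :=
    ((PySem.List.pyRange 1 n 1).foldl
      (fun acc i =>
        if PySem.List.pyGetD anios i 0 ≠ PySem.List.pyGetD anios (i - 1) 0 + 1
        then acc ++ [i] else acc) [0]) ++ [n]
  ((bounds.drop 1).foldl
    (fun (p : Int × Int) b => (if b - p.2 > p.1 then b - p.2 else p.1, b)) (0, 0)).1

-- ===== PRECONDITION & SPEC =====
def Spec_racha_consecutiva_maxima_py (anios : List Int) (out : Int) : Prop := out = racha_consecutiva_maxima_py_alt anios
instance (anios : List Int) (out : Int) : Decidable (Spec_racha_consecutiva_maxima_py anios out) := by unfold Spec_racha_consecutiva_maxima_py; infer_instance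

-- ===== CLAIM (what is proved, stated in full; the proofs are below) =====
def Claim_equal_racha_consecutiva_maxima_py : Prop := ∀ (anios : List Int), Dom_racha_consecutiva_maxima_py anios → Spec_racha_consecutiva_maxima_py anios (racha_consecutiva_maxima_py anios)

-- ===== LEMMAS AND PROOFS =====

-- A's loop body
def pvAStep (anios : List Int) (p : Int × Int) (i : Int) : Int × Int :=
  let actual := if PySem.List.pyGetD anios i 0 = PySem.List.pyGetD anios (i - 1) 0 + 1
                then p.2 + 1 else 1
  let mejor := if actual > p.1 then actual else p.1
  (mejor, actual)

-- B's boundary-collecting loop body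
def pvBCollect (anios : List Int) (acc : List Int) (i : Int) : List Int :=
  if PySem.List.pyGetD anios i 0 ≠ PySem.List.pyGetD anios (i - 1) 0 + 1 then acc ++ [i] else acc

-- B's gap-max loop body
def pvBStep (p : Int × Int) (b : Int) : Int × Int :=
  (if b - p.2 > p.1 then b - p.2 else p.1, b)

-- Joint invariant of A's fold and B's boundary list after processing indices 1..m-1.
lemma pv_inv (anios : List Int) : ∀ (m : Nat), 1 ≤ m →
    ∃ t : List Int,
      (PySem.List.pyRange 1 (m : Int) 1).foldl (pvBCollect anios) [0] = 0 :: t ∧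
      (PySem.List.pyRange 1 (m : Int) 1).foldl (pvAStep anios) (1, 1)
        = (if (m : Int) - (t.foldl pvBStep (0, 0)).2 > (t.foldl pvBStep (0, 0)).1
           then (m : Int) - (t.foldl pvBStep (0, 0)).2 else (t.foldl pvBStep (0, 0)).1,
           (m : Int) - (t.foldl pvBStep (0, 0)).2) ∧
      0 ≤ (t.foldl pvBStep (0, 0)).2 ∧ (t.foldl pvBStep (0, 0)).2 + 1 ≤ (m : Int) := by
  intro m hm
  induction m with
  | zero => omega
  | succ m ih =>
    rcases Nat.lt_or_ge m 1 with hm1 | hm1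
    · -- m = 0, so m+1 = 1: the range is empty
      interval_cases m
      refine ⟨[], ?_, ?_, ?_, ?_⟩ <;>
        norm_num [PySem.List.pyRange_one_eq_nil, pvBStep]
    · obtain ⟨t, hB, hA, hq0, hq1⟩ := ih hm1
      have hsplit : PySem.List.pyRange 1 ((m + 1 : Nat) : Int) 1
          = PySem.List.pyRange 1 (m : Int) 1 ++ [(m : Int)] := by
        push_cast
        exact PySem.List.pyRange_one_succ_right (by exact_mod_cast hm1)
      by_cases h : PySem.List.pyGetD anios (m : Int) 0 = PySem.List.pyGetD anios ((m : Int) - 1) 0 + 1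
      · -- no break at index m: boundary list unchanged, streak extends
        refine ⟨t, ?_, ?_, hq0, by push_cast; omega⟩
        · rw [hsplit, List.foldl_append, hB]
          simp only [List.foldl_cons, List.foldl_nil, pvBCollect]
          rw [if_neg (not_not_intro h)]
        · rw [hsplit, List.foldl_append, hA]
          simp only [List.foldl_cons, List.foldl_nil, pvAStep, if_pos h]
          push_cast
          simp only [Prod.mk.injEq]
          refine ⟨?_, by omega⟩
          split_ifs <;> omega
      · -- break at index m: append boundary m, streak resets to 1
        refine ⟨t ++ [(m : Int)], ?_, ?_, ?_, ?_⟩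
        · rw [hsplit, List.foldl_append, hB]
          simp only [List.foldl_cons, List.foldl_nil, pvBCollect, ne_eq, if_pos h,
            List.cons_append]
        · rw [hsplit, List.foldl_append, hA, List.foldl_append]
          simp only [List.foldl_cons, List.foldl_nil, pvAStep, pvBStep, if_neg h]
          push_cast
          simp only [Prod.mk.injEq]
          refine ⟨?_, by omega⟩
          split_ifs <;> omega
        · simp only [List.foldl_append, List.foldl_cons, List.foldl_nil, pvBStep]
          omega
        · simp only [List.foldl_append, List.foldl_cons, List.foldl_nil, pvBStep]
          push_cast
          omega

lemma pv_portA_fold (anios : List Int) (h : anios ≠ []) :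
    racha_consecutiva_maxima_py anios
      = ((PySem.List.pyRange 1 (anios.length : Int) 1).foldl (pvAStep anios) (1, 1)).1 := by
  unfold racha_consecutiva_maxima_py
  rw [if_neg h]
  rfl

lemma pv_portB_fold (anios : List Int) :
    racha_consecutiva_maxima_py_alt anios
      = (((((PySem.List.pyRange 1 (anios.length : Int) 1).foldl (pvBCollect anios) [0])
            ++ [(anios.length : Int)]).drop 1).foldl pvBStep (0, 0)).1 := by
  rfl

-- ===== VERDICT (by name: the statement is the Claim_ definition above) =====
theorem racha_consecutiva_maxima_py_spec : Claim_equal_racha_consecutiva_maxima_py := by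
  intro anios _
  unfold Spec_racha_consecutiva_maxima_py
  by_cases h : anios = []
  · subst h; decide
  · have hlen : 1 ≤ anios.length := List.length_pos_iff.mpr h
    obtain ⟨t, hB, hA, hq0, hq1⟩ := pv_inv anios anios.length hlen
    rw [pv_portA_fold anios h, pv_portB_fold anios, hB, hA]
    simp only [List.cons_append, List.drop_succ_cons, List.drop_zero, List.foldl_append,
      List.foldl_cons, List.foldl_nil, pvBStep]
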